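-- pv_equiv track=rewrite | github.com/piotrhelm/NESTFUL | data_v2/executable_functions/py_code_file_3193.py | both_positive_and_negative
-- ===== SOURCE A (Python) =====
-- from typing import List
--
-- def both_positive_and_negative(nums: List[int]) -> bool:
--
--     """Checks if a list of integers contains both positive and negative integers.
--
--
--
--     Args:
--
--         nums: A list of integers.
--
--
--
--     Returns:
--
--         True if the list contains both positive and negative integers, False otherwise.
--
--     """
--
--     if len(nums) == 0:
--
--         return False
--
--
--
--     positive_exists = False
--
--     negative_exists = False
--
--
--
--     for num in nums:
--
--         if num > 0:
--
--             positive_exists = True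
--
--         elif num < 0:
--
--             negative_exists = True
--
--
--
--         if positive_exists and negative_exists:
--
--             return True
--
--
--
--     return False
-- ===== SOURCE B (Python) =====
-- from typing import List
--
-- def both_positive_and_negative(nums: List[int]) -> bool:
--     """Two independent short-circuit existence checks instead of one fused flag loop."""
--     return any(x > 0 for x in nums) and any(x < 0 for x in nums)
-- ===== Notes on version B (the rewrite author's own statement) =====
-- stated objective: idiomatic
-- what changed: A's single fused loop maintaining two flags with a combined early exit is replaced by two independent short-circuiting existence scans combined with 'and'.
import Mathlib
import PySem

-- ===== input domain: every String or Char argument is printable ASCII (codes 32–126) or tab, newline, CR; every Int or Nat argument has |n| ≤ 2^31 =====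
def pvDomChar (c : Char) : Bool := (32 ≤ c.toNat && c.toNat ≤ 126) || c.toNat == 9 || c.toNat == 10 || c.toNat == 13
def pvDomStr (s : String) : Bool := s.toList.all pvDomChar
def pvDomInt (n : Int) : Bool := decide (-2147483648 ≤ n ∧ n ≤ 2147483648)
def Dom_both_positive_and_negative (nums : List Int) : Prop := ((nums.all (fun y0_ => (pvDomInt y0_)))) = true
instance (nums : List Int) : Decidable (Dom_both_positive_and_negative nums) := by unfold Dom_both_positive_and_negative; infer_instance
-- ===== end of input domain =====

-- B replaces A's fused two-flag loop by two independent short-circuit existence scans (idiomatic; same cost).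

-- ===== PORT A =====
-- A's loop: two flags, early return once both are set.
def bpnLoopA : List Int → Bool → Bool → Bool
  | [], _, _ => false
  | x :: xs, p, n =>
    let p' := if x > 0 then true else p
    let n' := if x > 0 then n else if x < 0 then true else n
    if p' && n' then true else bpnLoopA xs p' n'

def both_positive_and_negative (nums : List Int) : Bool :=
  if nums.length == 0 then false
  else bpnLoopA nums false false

-- ===== PORT B =====
def both_positive_and_negative_alt (nums : List Int) : Bool :=
  nums.any (fun x => x > 0) && nums.any (fun x => x < 0)

-- ===== PRECONDITION & SPEC =====
def Spec_both_positive_and_negative (nums : List Int) (out : Bool) : Prop := out = both_positive_and_negative_alt nums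
instance (nums : List Int) (out : Bool) : Decidable (Spec_both_positive_and_negative nums out) := by unfold Spec_both_positive_and_negative; infer_instance

-- ===== CLAIM (what is proved, stated in full; the proofs are below) =====
def Claim_equal_both_positive_and_negative : Prop := ∀ (nums : List Int), Dom_both_positive_and_negative nums → Spec_both_positive_and_negative nums (both_positive_and_negative nums)

-- ===== LEMMAS AND PROOFS =====
-- Loop invariant: as long as the flags are not both set, the loop computes
-- "(p or a positive exists) and (n or a negative exists)".
theorem bpnLoopA_eq (xs : List Int) (p n : Bool) (h : ¬ (p = true ∧ n = true)) :
    bpnLoopA xs p n = ((p || xs.any (fun x => x > 0)) && (n || xs.any (fun x => x < 0))) := by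
  induction xs generalizing p n with
  | nil =>
    simp only [bpnLoopA, List.any_nil, Bool.or_false]
    cases p <;> cases n <;> simp_all
  | cons x xs ih =>
    simp only [bpnLoopA, List.any_cons]
    by_cases hx : x > 0
    · by_cases hn : n = true
      · simp [hx, hn]
      · simp only [if_pos hx]
        simp only [Bool.not_eq_true] at hn
        subst hn
        simp only [Bool.true_and]
        rw [ih true false (by simp)]
        have hxneg : ¬ x < 0 := by omega
        simp [hx, hxneg]
    · by_cases hx' : x < 0
      · by_cases hp : p = true
        · simp [hx, hx', hp]
        · simp only [Bool.not_eq_true] at hp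
          subst hp
          simp only [if_neg hx, if_pos hx', Bool.false_and, Bool.false_and, if_neg (Bool.false_ne_true)]
          rw [ih false true (by simp)]
          simp [hx, hx']
      · have hx0 : x = 0 := by omega
        simp only [if_neg hx, if_neg hx']
        have : ¬ (p && n) = true := by cases p <;> cases n <;> simp_all
        rw [if_neg this, ih p n h]
        simp [hx0]

-- ===== VERDICT (by name: the statement is the Claim_ definition above) =====
theorem both_positive_and_negative_spec : Claim_equal_both_positive_and_negative := by
  intro nums _
  unfold Spec_both_positive_and_negative both_positive_and_negative both_positive_and_negative_alt
  cases nums with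
  | nil => simp
  | cons x xs =>
    simp only [List.length_cons]
    rw [if_neg (by simp)]
    rw [bpnLoopA_eq _ false false (by simp)]
    simp
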